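-- pv_equiv track=rewrite | github.com/gongohsamgong/AlgorithmStudy | study/programmers_lightCycle.py | solution
-- ===== SOURCE A (Python) =====
-- def solution(grid):
--     answer = []
--     dy = [1, 0, -1, 0]
--     dx = [0, -1, 0, 1]
--
--     ly, lx = len(grid), len(grid[0])
--
--     visited = [[[False] * 4 for _ in range(lx)] for _ in range(ly)]
--
--     for y in range(ly):
--         for x in range(lx):
--             # d = [0, 1, 2, 3] == [위, 오른, 아래, 왼]
--             for direction in range(4):
--                 if visited[y][x][direction]:
--                     continue
--                 count = 0
--                 ny, nx = y, x
--                 while not visited[ny][nx][direction]: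
--                     visited[ny][nx][direction] = True
--                     count += 1
--                     if grid[ny][nx] == 'S':
--                         pass
--                     elif grid[ny][nx] == 'L':
--                         direction = (direction - 1) % 4
--                     elif grid[ny][nx] == 'R':
--                         direction = (direction + 1) % 4
--                     ny = (ny + dy[direction]) % ly
--                     nx = (nx + dx[direction]) % lx
--                 answer.append(count)
--     answer = sorted(answer)
--     return answer
-- ===== SOURCE B (Python) =====
-- def solution(grid):
--     ly, lx = len(grid), len(grid[0])
--     total = ly * lx * 4
--     dy = (1, 0, -1, 0)
--     dx = (0, -1, 0, 1)
--
--     def step(s):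
--         d = s % 4
--         x = (s // 4) % lx
--         y = s // (4 * lx)
--         c = grid[y][x]
--         if c == 'L':
--             d = (d - 1) % 4
--         elif c == 'R':
--             d = (d + 1) % 4
--         return (((y + dy[d]) % ly) * lx + (x + dx[d]) % lx) * 4 + d
--
--     lengths = []
--     for s in range(total):
--         t, k = step(s), 1
--         while t > s:
--             t, k = step(t), k + 1
--         if t == s:
--             lengths.append(k)
--     return sorted(lengths)
-- ===== Notes on version B (the rewrite author's own statement) =====
-- stated objective: alternative
-- what changed: B drops A's 3-D visited bookkeeping entirely: it views the move as a permutation of flat states s=(y*lx+x)*4+dir and, for each state, walks its cycle once with an early exit, emitting the cycle length only when the state is the minimum of its cycle (canonical-representative test), then sorts.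
import Mathlib
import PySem

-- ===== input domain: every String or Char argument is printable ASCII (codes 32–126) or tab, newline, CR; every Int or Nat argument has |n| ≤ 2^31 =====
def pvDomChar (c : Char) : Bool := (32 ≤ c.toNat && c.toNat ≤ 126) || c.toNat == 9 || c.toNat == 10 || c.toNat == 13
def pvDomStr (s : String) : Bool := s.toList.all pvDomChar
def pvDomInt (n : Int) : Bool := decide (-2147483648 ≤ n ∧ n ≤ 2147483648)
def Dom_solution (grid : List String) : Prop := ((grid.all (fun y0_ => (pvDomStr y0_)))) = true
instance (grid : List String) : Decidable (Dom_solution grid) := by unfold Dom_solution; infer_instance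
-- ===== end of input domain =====

-- B re-implements the simulation without any visited bookkeeping: it treats the move as a
-- permutation of flat states and, for each state, walks its cycle once, emitting the cycle
-- length only when the state is the minimum of its cycle (alternative; no speed claim).

-- ===== PORT A =====
-- A's inner while loop; fuel = ly*lx*4 bounds its iterations (each iteration marks a fresh state)
def pvA_walk (grid : List String) (dy dx : List Int) (ly lx : Nat)
    (fuel : Nat) (direction ny nx : Int) (count : Int)
    (visited : List (List (List Bool))) : Int × List (List (List Bool)) :=
  match fuel with
  | 0 => (count, visited)
  | fuel + 1 =>
    if PySem.List.pyGetD (PySem.List.pyGetD (PySem.List.pyGetD visited ny []) nx []) direction false then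
      (count, visited)
    else
      let visited := PySem.List.pySetD visited ny
        (PySem.List.pySetD (PySem.List.pyGetD visited ny []) nx
          (PySem.List.pySetD (PySem.List.pyGetD (PySem.List.pyGetD visited ny []) nx []) direction true))
      let count := count + 1
      let c := PySem.Str.pyGet? (PySem.List.pyGetD grid ny "") nx
      let direction :=
        if c = some 'S' then direction
        else if c = some 'L' then PySem.Int.mod (direction - 1) 4
        else if c = some 'R' then PySem.Int.mod (direction + 1) 4
        else direction
      let ny := PySem.Int.mod (ny + PySem.List.pyGetD dy direction 0) ly
      let nx := PySem.Int.mod (nx + PySem.List.pyGetD dx direction 0) lx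
      pvA_walk grid dy dx ly lx fuel direction ny nx count visited

def solution (grid : List String) : List Int :=
  let dy : List Int := [1, 0, -1, 0]
  let dx : List Int := [0, -1, 0, 1]
  let ly : Nat := grid.length
  let lx : Nat := ((PySem.List.pyGet? grid 0).getD "").toList.length   -- len(grid[0]); Pre_ gives grid ≠ []
  let visited := List.replicate ly (List.replicate lx (List.replicate 4 false))
  let res := (PySem.List.pyRange 0 ly 1).foldl (fun acc y =>
      (PySem.List.pyRange 0 lx 1).foldl (fun acc x =>
        (PySem.List.pyRange 0 4 1).foldl (fun (acc : List Int × List (List (List Bool))) direction =>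
          if PySem.List.pyGetD (PySem.List.pyGetD (PySem.List.pyGetD acc.2 y []) x []) direction false then
            acc
          else
            let r := pvA_walk grid dy dx ly lx (ly * lx * 4) direction y x 0 acc.2
            (acc.1 ++ [r.1], r.2)) acc) acc)
    (([] : List Int), visited)
  PySem.List.sorted res.1 (fun z => z) false

-- ===== PORT B =====
-- B's helper step(s): decode the flat state, turn, move, re-encode
def pvB_step (grid : List String) (ly lx : Nat) (s : Int) : Int :=
  let d := PySem.Int.mod s 4
  let x := PySem.Int.mod (PySem.Int.floordiv s 4) lx
  let y := PySem.Int.floordiv s (4 * lx)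
  let c := PySem.Str.pyGet? (PySem.List.pyGetD grid y "") x
  let d := if c = some 'L' then PySem.Int.mod (d - 1) 4
           else if c = some 'R' then PySem.Int.mod (d + 1) 4
           else d
  (PySem.Int.mod (y + PySem.List.pyGetD [(1 : Int), 0, -1, 0] d 0) ly * lx
    + PySem.Int.mod (x + PySem.List.pyGetD [(0 : Int), -1, 0, 1] d 0) lx) * 4 + d

-- B's inner while loop (while t > s); fuel = total bounds its iterations
def pvB_loop (grid : List String) (ly lx : Nat) (fuel : Nat) (s t k : Int) : Int × Int :=
  match fuel with
  | 0 => (t, k)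
  | fuel + 1 =>
    if s < t then pvB_loop grid ly lx fuel s (pvB_step grid ly lx t) (k + 1)
    else (t, k)

def solution_alt (grid : List String) : List Int :=
  let ly : Nat := grid.length
  let lx : Nat := ((PySem.List.pyGet? grid 0).getD "").toList.length
  let total : Nat := ly * lx * 4
  let lengths := (PySem.List.pyRange 0 total 1).foldl (fun (acc : List Int) s =>
    let r := pvB_loop grid ly lx total s (pvB_step grid ly lx s) 1
    if r.1 = s then acc ++ [r.2] else acc) []
  PySem.List.sorted lengths (fun z => z) false

-- ===== PRECONDITION & SPEC =====
-- Pre_ excludes the inputs on which Python A raises an IndexError: the empty grid (grid[0]) and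
-- grids with a row shorter than the first row (grid[ny][nx] on some reached state).
def Pre_solution (grid : List String) : Prop :=
  grid ≠ [] ∧ ∀ s ∈ grid, (grid.headD "").toList.length ≤ s.toList.length
instance (grid : List String) : Decidable (Pre_solution grid) := by
  unfold Pre_solution; infer_instance
def pvWitness_solution : List String := ["SL", "LR"]

def Spec_solution (grid : List String) (out : List Int) : Prop := out = solution_alt grid
instance (grid : List String) (out : List Int) : Decidable (Spec_solution grid out) := by
  unfold Spec_solution; infer_instance

-- ===== CLAIM (what is proved, stated in full; the proofs are below) =====
def Claim_equal_solution : Prop := ∀ (grid : List String), Dom_solution grid → Pre_solution grid → Spec_solution grid (solution grid)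

-- ===== LEMMAS AND PROOFS =====

-- flat encoding of a state (y, x, d)
def pvEnc (lx y x d : Nat) : Nat := (y * lx + x) * 4 + d

-- decoding
def pvDecY (lx s : Nat) : Nat := s / (4 * lx)
def pvDecX (lx s : Nat) : Nat := (s / 4) % lx
def pvDecD (s : Nat) : Nat := s % 4

-- the turn both programs apply at a cell, and its inverse
def pvDirN (c : Option Char) (d : Nat) : Nat :=
  if c = some 'L' then (d + 3) % 4 else if c = some 'R' then (d + 1) % 4 else d
def pvInvDirN (c : Option Char) (d : Nat) : Nat :=
  if c = some 'L' then (d + 1) % 4 else if c = some 'R' then (d + 3) % 4 else d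

-- the common successor state, on Nat coordinates
def pvStepN (grid : List String) (ly lx y x d : Nat) : Nat × Nat × Nat :=
  let d' := pvDirN ((grid.getD y "").toList[x]?) d
  ((y + (if d' = 0 then 1 else if d' = 2 then ly - 1 else 0)) % ly,
   (x + (if d' = 3 then 1 else if d' = 1 then lx - 1 else 0)) % lx,
   d')

-- the flat-state successor function, identity off [0, ly*lx*4)
def pvFn (grid : List String) (ly lx : Nat) (s : Nat) : Nat :=
  if s < ly * lx * 4 then
    pvEnc lx (pvStepN grid ly lx (pvDecY lx s) (pvDecX lx s) (pvDecD s)).1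
      (pvStepN grid ly lx (pvDecY lx s) (pvDecX lx s) (pvDecD s)).2.1
      (pvStepN grid ly lx (pvDecY lx s) (pvDecX lx s) (pvDecD s)).2.2
  else s

-- the flat-state predecessor function (left inverse of pvFn)
def pvGn (grid : List String) (ly lx : Nat) (s : Nat) : Nat :=
  if s < ly * lx * 4 then
    let d' := pvDecD s
    let x' := pvDecX lx s
    let y' := pvDecY lx s
    let py := (y' + (if d' = 0 then ly - 1 else if d' = 2 then 1 else 0)) % ly
    let px := (x' + (if d' = 3 then lx - 1 else if d' = 1 then 1 else 0)) % lx
    pvEnc lx py px (pvInvDirN ((grid.getD py "").toList[px]?) d')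
  else s

-- orbit relation of a function
def pvOrb (F : Nat → Nat) (s t : Nat) : Prop := ∃ k, F^[k] s = t

-- proof-side model of A's inner loop over flat states
def pvMWalk (F : Nat → Nat) (fuel t : Nat) (cnt : Int) (vf : List Bool) : Int × List Bool :=
  match fuel with
  | 0 => (cnt, vf)
  | fuel + 1 =>
    if vf.getD t false then (cnt, vf)
    else pvMWalk F fuel (F t) (cnt + 1) (vf.set t true)

def pvMBody (F : Nat → Nat) (fuel : Nat) (acc : List Int × List Bool) (s : Nat) :
    List Int × List Bool :=
  if acc.2.getD s false then acc
  else
    let r := pvMWalk F fuel s 0 acc.2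
    (acc.1 ++ [r.1], r.2)

-- proof-side model of B's inner loop over flat states
def pvMLoop (F : Nat → Nat) (fuel s t : Nat) (k : Int) : Nat × Int :=
  match fuel with
  | 0 => (t, k)
  | fuel + 1 =>
    if s < t then pvMLoop F fuel s (F t) (k + 1)
    else (t, k)

def pvBBody (F : Nat → Nat) (fuel : Nat) (acc : List Int) (s : Nat) : List Int :=
  let r := pvMLoop F fuel s (F s) 1
  if r.1 = s then acc ++ [r.2] else acc

-- ===== basic arithmetic lemmas =====

lemma pvDirN_lt (c : Option Char) (d : Nat) (hd : d < 4) : pvDirN c d < 4 := by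
  unfold pvDirN; split_ifs <;> omega

lemma pvDir_cast_A (c : Option Char) (d : Nat) (hd : d < 4) :
    (if c = some 'S' then (d : Int)
     else if c = some 'L' then PySem.Int.mod ((d : Int) - 1) 4
     else if c = some 'R' then PySem.Int.mod ((d : Int) + 1) 4
     else (d : Int)) = ((pvDirN c d : Nat) : Int) := by
  unfold pvDirN
  by_cases hS : c = some 'S'
  · simp [hS]
  · simp only [hS, if_false]
    split_ifs with h1 h2
    · interval_cases d <;> decide
    · interval_cases d <;> decide
    · rfl

lemma pvDir_cast_B (c : Option Char) (d : Nat) (hd : d < 4) :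
    (if c = some 'L' then PySem.Int.mod ((d : Int) - 1) 4
     else if c = some 'R' then PySem.Int.mod ((d : Int) + 1) 4
     else (d : Int)) = ((pvDirN c d : Nat) : Int) := by
  unfold pvDirN
  split_ifs with h1 h2
  · interval_cases d <;> decide
  · interval_cases d <;> decide
  · rfl

lemma pvMove_core (y ly : Nat) (δ : Int) (m : Nat) (hly : 0 < ly)
    (hδ : δ + (ly : Int) = ((m : Nat) : Int)) :
    PySem.Int.mod ((y : Int) + δ) (ly : Int) = (((y + m) % ly : Nat) : Int) := by
  rw [PySem.Int.mod_eq_emod_of_pos (by exact_mod_cast hly)]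
  have h1 : (y : Int) + δ = ((y + m : Nat) : Int) - (ly : Int) := by push_cast; omega
  rw [h1, Int.sub_emod_right, ← Int.natCast_emod]

lemma pvMove_y (y ly dN : Nat) (hl : 0 < ly) (hd : dN < 4) :
    PySem.Int.mod ((y : Int) + PySem.List.pyGetD [(1:Int), 0, -1, 0] ((dN : Nat) : Int) 0) (ly : Int)
      = (((y + (if dN = 0 then 1 else if dN = 2 then ly - 1 else 0)) % ly : Nat) : Int) := by
  interval_cases dN
  · rw [show PySem.List.pyGetD [(1:Int), 0, -1, 0] ((0:Nat) : Int) 0 = 1 from by decide,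
      pvMove_core y ly (1) (ly + 1) hl (by omega)]
    norm_num
    rw [show (y:Int) + ((ly:Int) + 1) = ((y:Int) + 1) + (ly:Int) from by ring, Int.add_emod_right]
  · rw [show PySem.List.pyGetD [(1:Int), 0, -1, 0] ((1:Nat) : Int) 0 = 0 from by decide,
      pvMove_core y ly (0) (ly) hl (by omega)]
    norm_num
  · rw [show PySem.List.pyGetD [(1:Int), 0, -1, 0] ((2:Nat) : Int) 0 = -1 from by decide,
      pvMove_core y ly (-1) (ly - 1) hl (by omega)]
    norm_num
  · rw [show PySem.List.pyGetD [(1:Int), 0, -1, 0] ((3:Nat) : Int) 0 = 0 from by decide,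
      pvMove_core y ly (0) (ly) hl (by omega)]
    norm_num

lemma pvMove_x (x lx dN : Nat) (hl : 0 < lx) (hd : dN < 4) :
    PySem.Int.mod ((x : Int) + PySem.List.pyGetD [(0:Int), -1, 0, 1] ((dN : Nat) : Int) 0) (lx : Int)
      = (((x + (if dN = 3 then 1 else if dN = 1 then lx - 1 else 0)) % lx : Nat) : Int) := by
  interval_cases dN
  · rw [show PySem.List.pyGetD [(0:Int), -1, 0, 1] ((0:Nat) : Int) 0 = 0 from by decide,
      pvMove_core x lx (0) (lx) hl (by omega)]
    norm_num
  · rw [show PySem.List.pyGetD [(0:Int), -1, 0, 1] ((1:Nat) : Int) 0 = -1 from by decide,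
      pvMove_core x lx (-1) (lx - 1) hl (by omega)]
    norm_num
  · rw [show PySem.List.pyGetD [(0:Int), -1, 0, 1] ((2:Nat) : Int) 0 = 0 from by decide,
      pvMove_core x lx (0) (lx) hl (by omega)]
    norm_num
  · rw [show PySem.List.pyGetD [(0:Int), -1, 0, 1] ((3:Nat) : Int) 0 = 1 from by decide,
      pvMove_core x lx (1) (lx + 1) hl (by omega)]
    norm_num
    rw [show (x:Int) + ((lx:Int) + 1) = ((x:Int) + 1) + (lx:Int) from by ring, Int.add_emod_right]

lemma pvEnc_lt (lx ly y x d : Nat) (hy : y < ly) (hx : x < lx) (hd : d < 4) :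
    pvEnc lx y x d < ly * lx * 4 := by
  have h1 : y * lx + x < (y + 1) * lx := by rw [add_one_mul]; omega
  have h2 : (y + 1) * lx ≤ ly * lx := Nat.mul_le_mul_right lx (by omega)
  unfold pvEnc; omega

lemma pvDecD_enc (lx y x d : Nat) (hd : d < 4) : pvDecD (pvEnc lx y x d) = d := by
  unfold pvDecD pvEnc; omega

lemma pvDecX_enc (lx y x d : Nat) (hx : x < lx) (hd : d < 4) :
    pvDecX lx (pvEnc lx y x d) = x := by
  unfold pvDecX pvEnc
  have h1 : ((y * lx + x) * 4 + d) / 4 = y * lx + x := by omega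
  rw [h1, Nat.mul_comm y lx, Nat.mul_add_mod, Nat.mod_eq_of_lt hx]

lemma pvDecY_enc (lx y x d : Nat) (hx : x < lx) (hd : d < 4) :
    pvDecY lx (pvEnc lx y x d) = y := by
  unfold pvDecY pvEnc
  have h1 : (y * lx + x) * 4 + d = (4 * lx) * y + (x * 4 + d) := by ring
  have h2 : x * 4 + d < 4 * lx := by omega
  rw [h1, Nat.mul_add_div (by omega), Nat.div_eq_of_lt h2, Nat.add_zero]

lemma pvDec_bounds (ly lx s : Nat) (hs : s < ly * lx * 4) :
    pvDecY lx s < ly ∧ pvDecX lx s < lx ∧ pvDecD s < 4 := by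
  have hlx : 0 < lx := by by_contra h; simp at h; subst h; simp at hs
  refine ⟨?_, Nat.mod_lt _ hlx, by unfold pvDecD; omega⟩
  unfold pvDecY
  rw [Nat.div_lt_iff_lt_mul (by omega)]
  calc s < ly * lx * 4 := hs
    _ = ly * (4 * lx) := by ring

lemma pvEnc_dec (ly lx s : Nat) (hs : s < ly * lx * 4) :
    pvEnc lx (pvDecY lx s) (pvDecX lx s) (pvDecD s) = s := by
  have hlx : 0 < lx := by by_contra h; simp at h; subst h; simp at hs
  unfold pvEnc pvDecY pvDecX pvDecD
  have h0 : s / (4 * lx) = s / 4 / lx := (Nat.div_div_eq_div_mul s 4 lx).symm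
  have h1 : s / 4 / lx * lx + s / 4 % lx = s / 4 := Nat.div_add_mod' _ _
  rw [h0, h1]
  omega

-- pvFn at an encoded state is the encoded successor
lemma pvFn_enc (grid : List String) (ly lx y x d : Nat) (hy : y < ly) (hx : x < lx) (hd : d < 4) :
    pvFn grid ly lx (pvEnc lx y x d)
      = pvEnc lx (pvStepN grid ly lx y x d).1 (pvStepN grid ly lx y x d).2.1
          (pvStepN grid ly lx y x d).2.2 := by
  unfold pvFn
  rw [if_pos (pvEnc_lt lx ly y x d hy hx hd),
    pvDecY_enc lx y x d hx hd, pvDecX_enc lx y x d hx hd, pvDecD_enc lx y x d hd]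

-- pvFn stays inside the state space
lemma pvFn_lt (grid : List String) (ly lx s : Nat) (hs : s < ly * lx * 4) :
    pvFn grid ly lx s < ly * lx * 4 := by
  obtain ⟨hy, hx, hd⟩ := pvDec_bounds ly lx s hs
  have hly : 0 < ly := by omega
  have hlx : 0 < lx := by omega
  unfold pvFn
  rw [if_pos hs]
  exact pvEnc_lt lx ly _ _ _ (Nat.mod_lt _ hly) (Nat.mod_lt _ hlx)
    (pvDirN_lt _ _ hd)

lemma pvModCancel (y ly a b : Nat) (hy : y < ly) (hab : a + b = ly ∨ (a = 0 ∧ b = 0)) :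
    ((y + a) % ly + b) % ly = y := by
  rw [Nat.mod_add_mod]
  rcases hab with h | ⟨h1, h2⟩
  · have : y + a + b = y + ly := by omega
    rw [this, Nat.add_mod_right, Nat.mod_eq_of_lt hy]
  · subst h1; subst h2; simpa using Nat.mod_eq_of_lt hy

lemma pvInvDir_dir (c : Option Char) (d : Nat) (hd : d < 4) :
    pvInvDirN c (pvDirN c d) = d := by
  unfold pvInvDirN pvDirN
  by_cases h1 : c = some 'L'
  · simp only [h1, if_true]; interval_cases d <;> decide
  · by_cases h2 : c = some 'R'
    · simp only [h1, h2, if_false, if_true]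
      have : ¬ (some 'R' = some 'L') := by decide
      simp only [h2, this, if_false, if_true]
      interval_cases d <;> decide
    · simp [h1, h2]

-- pvGn is a left inverse of pvFn
lemma pvGn_Fn (grid : List String) (ly lx : Nat) : ∀ s, pvGn grid ly lx (pvFn grid ly lx s) = s := by
  intro s
  by_cases hs : s < ly * lx * 4
  · obtain ⟨hy, hx, hd⟩ := pvDec_bounds ly lx s hs
    have hly : 0 < ly := by omega
    have hlx : 0 < lx := by omega
    set y := pvDecY lx s with hy'
    set x := pvDecX lx s with hx'
    set d := pvDecD s with hd'
    have hse : pvEnc lx y x d = s := pvEnc_dec ly lx s hs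
    have hF : pvFn grid ly lx s
        = pvEnc lx (pvStepN grid ly lx y x d).1 (pvStepN grid ly lx y x d).2.1
            (pvStepN grid ly lx y x d).2.2 := by
      rw [← hse]; exact pvFn_enc grid ly lx y x d hy hx hd
    set d'' := pvDirN ((grid.getD y "").toList[x]?) d with hd''
    have hd''4 : d'' < 4 := pvDirN_lt _ _ hd
    have hstep : pvStepN grid ly lx y x d =
        ((y + (if d'' = 0 then 1 else if d'' = 2 then ly - 1 else 0)) % ly,
         (x + (if d'' = 3 then 1 else if d'' = 1 then lx - 1 else 0)) % lx, d'') := rfl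
    rw [hF, hstep]
    have hy1 : (y + (if d'' = 0 then 1 else if d'' = 2 then ly - 1 else 0)) % ly < ly :=
      Nat.mod_lt _ hly
    have hx1 : (x + (if d'' = 3 then 1 else if d'' = 1 then lx - 1 else 0)) % lx < lx :=
      Nat.mod_lt _ hlx
    unfold pvGn
    rw [if_pos (pvEnc_lt lx ly _ _ _ hy1 hx1 hd''4)]
    simp only [pvDecD_enc _ _ _ _ hd''4, pvDecX_enc _ _ _ _ hx1 hd''4,
      pvDecY_enc _ _ _ _ hx1 hd''4]
    have hpy : ((y + (if d'' = 0 then 1 else if d'' = 2 then ly - 1 else 0)) % ly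
        + (if d'' = 0 then ly - 1 else if d'' = 2 then 1 else 0)) % ly = y := by
      apply pvModCancel _ _ _ _ hy
      split_ifs <;> omega
    have hpx : ((x + (if d'' = 3 then 1 else if d'' = 1 then lx - 1 else 0)) % lx
        + (if d'' = 3 then lx - 1 else if d'' = 1 then 1 else 0)) % lx = x := by
      apply pvModCancel _ _ _ _ hx
      split_ifs <;> omega
    rw [hpy, hpx, hd'', pvInvDir_dir _ _ hd, hse]
  · have hF : pvFn grid ly lx s = s := by unfold pvFn; rw [if_neg hs]
    rw [hF]; unfold pvGn; rw [if_neg hs]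

lemma pvFn_inj (grid : List String) (ly lx : Nat) : Function.Injective (pvFn grid ly lx) :=
  Function.LeftInverse.injective (pvGn_Fn grid ly lx)

-- ===== permutation / orbit facts =====

lemma pvIter_lt (grid : List String) (ly lx : Nat) :
    ∀ (k s : Nat), s < ly * lx * 4 → (pvFn grid ly lx)^[k] s < ly * lx * 4 := by
  intro k
  induction k with
  | zero => intro s hs; simpa using hs
  | succ k ih =>
    intro s hs
    rw [Function.iterate_succ_apply']
    exact pvFn_lt grid ly lx _ (ih s hs)

lemma pvPeriodic (grid : List String) (ly lx : Nat) (s : Nat) (hs : s < ly * lx * 4) :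
    s ∈ Function.periodicPts (pvFn grid ly lx)
      ∧ Function.minimalPeriod (pvFn grid ly lx) s ≤ ly * lx * 4 := by
  set F := pvFn grid ly lx with hF
  set n := ly * lx * 4 with hn
  have hmap : Set.MapsTo (fun k => F^[k] s) ↑(Finset.range (n + 1)) ↑(Finset.range n) := by
    intro k _
    simp only [Finset.coe_range, Set.mem_Iio]
    exact pvIter_lt grid ly lx k s hs
  obtain ⟨i, hi, j, hj, hij, heq⟩ :=
    Finset.exists_ne_map_eq_of_card_lt_of_maps_to (by simp) hmap
  simp only [Finset.mem_range] at hi hj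
  -- WLOG i < j
  have key : ∀ i j : Nat, i < j → j ≤ n → F^[i] s = F^[j] s →
      s ∈ Function.periodicPts F ∧ Function.minimalPeriod F s ≤ n := by
    intro i j hlt hle he
    have h1 : F^[i] (F^[j - i] s) = F^[i] s := by
      rw [← Function.iterate_add_apply]
      rw [show i + (j - i) = j from by omega]
      exact he.symm
    have h2 : F^[j - i] s = s := (pvFn_inj grid ly lx).iterate i h1
    have hpp : Function.IsPeriodicPt F (j - i) s := h2
    exact ⟨Function.mk_mem_periodicPts (by omega) hpp,
      le_trans (Function.IsPeriodicPt.minimalPeriod_le (by omega) hpp) (by omega)⟩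
  rcases Nat.lt_or_ge i j with h | h
  · exact key i j h (by omega) heq
  · have h' : j < i := by omega
    exact key j i h' (by omega) heq.symm

lemma pvOrb_trans (F : Nat → Nat) (s t u : Nat) (h1 : pvOrb F s t) (h2 : pvOrb F t u) :
    pvOrb F s u := by
  obtain ⟨k, rfl⟩ := h1
  obtain ⟨j, rfl⟩ := h2
  exact ⟨j + k, Function.iterate_add_apply F j k s⟩

lemma pvOrb_symm (F : Nat → Nat) (s t : Nat) (hs : s ∈ Function.periodicPts F)
    (h : pvOrb F s t) : pvOrb F t s := by
  obtain ⟨k, rfl⟩ := h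
  set p := Function.minimalPeriod F s with hp
  have hp0 : 0 < p := Function.minimalPeriod_pos_of_mem_periodicPts hs
  refine ⟨p - k % p, ?_⟩
  rw [← Function.iterate_add_apply]
  have hq : p - k % p + k = p * (k / p + 1) := by
    have h1 := Nat.div_add_mod k p
    have h3 : k % p < p := Nat.mod_lt _ hp0
    rw [Nat.mul_succ]
    omega
  rw [hq]
  exact (Function.isPeriodicPt_minimalPeriod F s).mul_const (k / p + 1)

lemma pvOrb_iff_lt_per (F : Nat → Nat) (s t : Nat) (hs : s ∈ Function.periodicPts F) :
    pvOrb F s t ↔ ∃ j, j < Function.minimalPeriod F s ∧ F^[j] s = t := by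
  constructor
  · rintro ⟨k, rfl⟩
    have hp0 : 0 < Function.minimalPeriod F s :=
      Function.minimalPeriod_pos_of_mem_periodicPts hs
    exact ⟨k % Function.minimalPeriod F s, Nat.mod_lt _ hp0,
      Function.iterate_mod_minimalPeriod_eq⟩
  · rintro ⟨j, _, rfl⟩
    exact ⟨j, rfl⟩

-- ===== relating port A's 3-D visited to the flat model =====

def pvRel (ly lx : Nat) (v3 : List (List (List Bool))) (vf : List Bool) : Prop :=
  v3.length = ly ∧
  (∀ y, y < ly → (v3.getD y []).length = lx ∧
    ∀ x, x < lx → ((v3.getD y []).getD x []).length = 4) ∧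
  vf.length = ly * lx * 4 ∧
  ∀ y x d, y < ly → x < lx → d < 4 →
    (((v3.getD y []).getD x []).getD d false) = vf.getD (pvEnc lx y x d) false

lemma pvGetD_set_self {α : Type} (l : List α) (i : Nat) (a d : α) (h : i < l.length) :
    (l.set i a).getD i d = a := by
  simp [List.getD_eq_getElem?_getD, h]

lemma pvGetD_set_ne {α : Type} (l : List α) (i j : Nat) (a d : α) (h : j ≠ i) :
    (l.set i a).getD j d = l.getD j d := by
  simp [List.getD_eq_getElem?_getD, Ne.symm h]

lemma pvEnc_inj (lx y1 x1 d1 y2 x2 d2 : Nat) (hx1 : x1 < lx) (hd1 : d1 < 4)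
    (hx2 : x2 < lx) (hd2 : d2 < 4) (h : pvEnc lx y1 x1 d1 = pvEnc lx y2 x2 d2) :
    y1 = y2 ∧ x1 = x2 ∧ d1 = d2 := by
  unfold pvEnc at h
  have hd : d1 = d2 := by omega
  have ha : y1 * lx + x1 = y2 * lx + x2 := by omega
  have hx : x1 = x2 := by
    have h1 : (y1 * lx + x1) % lx = x1 := by
      rw [Nat.mul_comm y1 lx, Nat.mul_add_mod, Nat.mod_eq_of_lt hx1]
    have h2 : (y2 * lx + x2) % lx = x2 := by
      rw [Nat.mul_comm y2 lx, Nat.mul_add_mod, Nat.mod_eq_of_lt hx2]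
    rw [ha] at h1
    omega
  have hy : y1 = y2 := by
    have hlx : 0 < lx := by omega
    exact Nat.eq_of_mul_eq_mul_right hlx (by omega)
  exact ⟨hy, hx, hd⟩

lemma pvRel_init (ly lx : Nat) :
    pvRel ly lx (List.replicate ly (List.replicate lx (List.replicate 4 false)))
      (List.replicate (ly * lx * 4) false) := by
  refine ⟨by simp, fun y hy => ?_, by simp, fun y x d hy hx hd => ?_⟩
  · constructor
    · simp [List.getD_eq_getElem?_getD, List.getElem?_replicate, hy]
    · intro x hx
      simp [List.getD_eq_getElem?_getD, List.getElem?_replicate, hy, hx]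
  · have hl : ((List.replicate ly (List.replicate lx (List.replicate 4 false))).getD y [] |>.getD x [] |>.getD d false) = false := by
      simp [List.getD_eq_getElem?_getD, List.getElem?_replicate, hy, hx]
      interval_cases d <;> rfl
    rw [hl]
    simp only [List.getD_eq_getElem?_getD, List.getElem?_replicate]
    split <;> rfl

lemma pvRel_set (ly lx : Nat) {v3 : List (List (List Bool))} {vf : List Bool}
    (h : pvRel ly lx v3 vf) (y x d : Nat) (hy : y < ly) (hx : x < lx) (hd : d < 4) :
    pvRel ly lx
      (v3.set y ((v3.getD y []).set x (((v3.getD y []).getD x []).set d true)))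
      (vf.set (pvEnc lx y x d) true) := by
  obtain ⟨h1, h2, h3, h4⟩ := h
  have hylen : y < v3.length := by omega
  have hrow : (v3.getD y []).length = lx := (h2 y hy).1
  have hcell : ((v3.getD y []).getD x []).length = 4 := (h2 y hy).2 x hx
  have henc : pvEnc lx y x d < vf.length := by rw [h3]; exact pvEnc_lt lx ly y x d hy hx hd
  refine ⟨by simp [h1], ?_, by simp [h3], ?_⟩
  · intro y' hy'
    by_cases hyy : y' = y
    · subst hyy
      rw [pvGetD_set_self _ _ _ _ hylen]
      refine ⟨by rw [List.length_set]; exact hrow, fun x' hx' => ?_⟩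
      by_cases hxx : x' = x
      · subst hxx
        rw [pvGetD_set_self _ _ _ _ (by omega), List.length_set]
        exact hcell
      · rw [pvGetD_set_ne _ _ _ _ _ hxx]
        exact (h2 _ hy).2 x' hx'
    · rw [pvGetD_set_ne _ _ _ _ _ hyy]
      exact h2 y' hy'
  · intro y' x' d' hy' hx' hd'
    by_cases htrip : y' = y ∧ x' = x ∧ d' = d
    · obtain ⟨e1, e2, e3⟩ := htrip; subst e1; subst e2; subst e3
      rw [pvGetD_set_self _ _ _ _ hylen, pvGetD_set_self _ _ _ _ (by omega),
        pvGetD_set_self _ _ _ _ (by omega), pvGetD_set_self _ _ _ _ henc]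
    · have hne : pvEnc lx y' x' d' ≠ pvEnc lx y x d := by
        intro he
        exact htrip (pvEnc_inj lx y' x' d' y x d hx' hd' hx hd he)
      rw [pvGetD_set_ne _ _ _ _ _ hne]
      rw [← h4 y' x' d' hy' hx' hd']
      by_cases hyy : y' = y
      · subst hyy
        rw [pvGetD_set_self _ _ _ _ hylen]
        by_cases hxx : x' = x
        · subst hxx
          rw [pvGetD_set_self _ _ _ _ (by omega)]
          have hdd : d' ≠ d := by tauto
          rw [pvGetD_set_ne _ _ _ _ _ hdd]
        · rw [pvGetD_set_ne _ _ _ _ _ hxx]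
      · rw [pvGetD_set_ne _ _ _ _ _ hyy]

lemma pvWalk_eq (grid : List String) (ly lx : Nat) :
    ∀ (fuel : Nat) (y x d : Nat) (cnt : Int) (v3 : List (List (List Bool))) (vf : List Bool),
      y < ly → x < lx → d < 4 → pvRel ly lx v3 vf →
      (pvA_walk grid [1,0,-1,0] [0,-1,0,1] ly lx fuel (d : Int) (y : Int) (x : Int) cnt v3).1
        = (pvMWalk (pvFn grid ly lx) fuel (pvEnc lx y x d) cnt vf).1
      ∧ pvRel ly lx
        (pvA_walk grid [1,0,-1,0] [0,-1,0,1] ly lx fuel (d : Int) (y : Int) (x : Int) cnt v3).2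
        (pvMWalk (pvFn grid ly lx) fuel (pvEnc lx y x d) cnt vf).2 := by
  intro fuel
  induction fuel with
  | zero => intro y x d cnt v3 vf hy hx hd hrel; exact ⟨rfl, hrel⟩
  | succ fuel ih =>
    intro y x d cnt v3 vf hy hx hd hrel
    have hly : 0 < ly := by omega
    have hlx : 0 < lx := by omega
    have h4 := hrel.2.2.2
    simp only [pvA_walk, pvMWalk, PySem.List.pyGetD_natCast, PySem.List.pySetD_natCast,
      PySem.Str.pyGet?_natCast]
    rw [h4 y x d hy hx hd]
    by_cases hb : vf.getD (pvEnc lx y x d) false = true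
    · rw [if_pos hb, if_pos hb]
      exact ⟨rfl, hrel⟩
    · rw [if_neg hb, if_neg hb]
      rw [pvDir_cast_A ((grid.getD y "").toList[x]?) d hd,
        pvMove_y y ly (pvDirN ((grid.getD y "").toList[x]?) d) hly
          (pvDirN_lt _ _ hd),
        pvMove_x x lx (pvDirN ((grid.getD y "").toList[x]?) d) hlx
          (pvDirN_lt _ _ hd),
        pvFn_enc grid ly lx y x d hy hx hd]
      have hstep : pvStepN grid ly lx y x d =
          ((y + (if pvDirN ((grid.getD y "").toList[x]?) d = 0 then 1
                 else if pvDirN ((grid.getD y "").toList[x]?) d = 2 then ly - 1 else 0)) % ly,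
           (x + (if pvDirN ((grid.getD y "").toList[x]?) d = 3 then 1
                 else if pvDirN ((grid.getD y "").toList[x]?) d = 1 then lx - 1 else 0)) % lx,
           pvDirN ((grid.getD y "").toList[x]?) d) := rfl
      rw [hstep]
      exact ih _ _ _ (cnt + 1) _ _ (Nat.mod_lt _ hly) (Nat.mod_lt _ hlx)
        (pvDirN_lt _ _ hd)
        (pvRel_set ly lx hrel y x d hy hx hd)

def pvBox (ly lx : Nat) : List (Nat × Nat × Nat) :=
  (List.range ly).flatMap (fun y => (List.range lx).flatMap (fun x =>
    (List.range 4).map (fun d => (y, x, d))))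

def pvBodyA (grid : List String) (ly lx : Nat)
    (acc : List Int × List (List (List Bool))) (t : Nat × Nat × Nat) :
    List Int × List (List (List Bool)) :=
  if PySem.List.pyGetD (PySem.List.pyGetD (PySem.List.pyGetD acc.2 (t.1 : Int) []) (t.2.1 : Int) [])
      (t.2.2 : Int) false then acc
  else
    let r := pvA_walk grid [1,0,-1,0] [0,-1,0,1] ly lx (ly * lx * 4)
      (t.2.2 : Int) (t.1 : Int) (t.2.1 : Int) 0 acc.2
    (acc.1 ++ [r.1], r.2)

lemma pvFold_eq (grid : List String) (ly lx : Nat) :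
    ∀ (ts : List (Nat × Nat × Nat)), (∀ t ∈ ts, t.1 < ly ∧ t.2.1 < lx ∧ t.2.2 < 4) →
    ∀ (ans : List Int) (v3 : List (List (List Bool))) (vf : List Bool), pvRel ly lx v3 vf →
    (ts.foldl (pvBodyA grid ly lx) (ans, v3)).1
      = (ts.foldl (fun acc t => pvMBody (pvFn grid ly lx) (ly * lx * 4) acc
          (pvEnc lx t.1 t.2.1 t.2.2)) (ans, vf)).1
    ∧ pvRel ly lx (ts.foldl (pvBodyA grid ly lx) (ans, v3)).2
        ((ts.foldl (fun acc t => pvMBody (pvFn grid ly lx) (ly * lx * 4) acc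
          (pvEnc lx t.1 t.2.1 t.2.2)) (ans, vf))).2 := by
  intro ts
  induction ts with
  | nil => intro _ ans v3 vf hrel; exact ⟨rfl, hrel⟩
  | cons t ts ih =>
    intro hb ans v3 vf hrel
    have ht := hb t List.mem_cons_self
    have hts : ∀ t' ∈ ts, t'.1 < ly ∧ t'.2.1 < lx ∧ t'.2.2 < 4 :=
      fun t' ht' => hb t' (List.mem_cons_of_mem t ht')
    simp only [List.foldl_cons, pvBodyA, pvMBody, PySem.List.pyGetD_natCast]
    rw [hrel.2.2.2 t.1 t.2.1 t.2.2 ht.1 ht.2.1 ht.2.2]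
    by_cases hv : vf.getD (pvEnc lx t.1 t.2.1 t.2.2) false = true
    · rw [if_pos hv, if_pos hv]
      exact ih hts ans v3 vf hrel
    · rw [if_neg hv, if_neg hv]
      obtain ⟨hc, hrel'⟩ := pvWalk_eq grid ly lx (ly * lx * 4)
        t.1 t.2.1 t.2.2 0 v3 vf ht.1 ht.2.1 ht.2.2 hrel
      rw [hc]
      exact ih hts _ _ _ hrel'

-- the nested index ranges, flattened
lemma pvRange_flatMap (n k : Nat) :
    (List.range n).flatMap (fun i => (List.range k).map (fun j => i * k + j))
      = List.range (n * k) := by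
  induction n with
  | zero => simp
  | succ n ih =>
    rw [List.range_succ, List.flatMap_append, ih, List.flatMap_singleton,
      show (n + 1) * k = n * k + k from by ring, List.range_add]

lemma pvBox_enc (ly lx : Nat) :
    (pvBox ly lx).map (fun t : Nat × Nat × Nat => pvEnc lx t.1 t.2.1 t.2.2)
      = List.range (ly * lx * 4) := by
  unfold pvBox
  rw [List.map_flatMap]
  have hinner : ∀ y, ((List.range lx).flatMap (fun x => (List.range 4).map (fun d => (y, x, d)))).map
      (fun t : Nat × Nat × Nat => pvEnc lx t.1 t.2.1 t.2.2)
      = (List.range (lx * 4)).map (fun k => y * (lx * 4) + k) := by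
    intro y
    rw [List.map_flatMap, ← pvRange_flatMap lx 4, List.map_flatMap]
    apply List.flatMap_congr
    intro x hx
    rw [List.map_map, List.map_map]
    apply List.map_congr_left
    intro d hd
    simp only [Function.comp_apply, pvEnc]
    ring
  calc (List.range ly).flatMap (fun y =>
        ((List.range lx).flatMap (fun x => (List.range 4).map (fun d => (y, x, d)))).map
          (fun t : Nat × Nat × Nat => pvEnc lx t.1 t.2.1 t.2.2))
      = (List.range ly).flatMap (fun y => (List.range (lx * 4)).map (fun k => y * (lx * 4) + k)) :=
        List.flatMap_congr (fun y _ => hinner y)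
    _ = List.range (ly * (lx * 4)) := pvRange_flatMap ly (lx * 4)
    _ = List.range (ly * lx * 4) := by rw [Nat.mul_assoc]

lemma pvBox_mem (ly lx : Nat) : ∀ t ∈ pvBox ly lx, t.1 < ly ∧ t.2.1 < lx ∧ t.2.2 < 4 := by
  intro t ht
  simp only [pvBox, List.mem_flatMap, List.mem_map, List.mem_range] at ht
  obtain ⟨y, hy, x, hx, d, hd, rfl⟩ := ht
  exact ⟨hy, hx, hd⟩

lemma pvA_reshape (grid : List String) :
    solution grid = PySem.List.sorted
      (((pvBox grid.length (((PySem.List.pyGet? grid 0).getD "").toList.length)).foldl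
        (pvBodyA grid grid.length (((PySem.List.pyGet? grid 0).getD "").toList.length))
        ([], List.replicate grid.length
          (List.replicate (((PySem.List.pyGet? grid 0).getD "").toList.length)
            (List.replicate 4 false)))).1)
      (fun z => z) false := by
  simp only [solution, pvBox, pvBodyA, PySem.List.pyRange_zero, Int.toNat_natCast,
    show ((4:Int).toNat = 4) from rfl, List.foldl_flatMap, List.foldl_map]

-- A's port equals the flat model fold
lemma pvA_to_model (grid : List String) :
    solution grid = PySem.List.sorted
      (((List.range (grid.length * (((PySem.List.pyGet? grid 0).getD "").toList.length) * 4)).foldl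
        (pvMBody (pvFn grid grid.length (((PySem.List.pyGet? grid 0).getD "").toList.length))
          (grid.length * (((PySem.List.pyGet? grid 0).getD "").toList.length) * 4))
        ([], List.replicate
          (grid.length * (((PySem.List.pyGet? grid 0).getD "").toList.length) * 4) false)).1)
      (fun z => z) false := by
  rw [pvA_reshape]
  obtain ⟨h1, _⟩ := pvFold_eq grid grid.length
    (((PySem.List.pyGet? grid 0).getD "").toList.length)
    (pvBox _ _) (pvBox_mem _ _) [] _ _ (pvRel_init _ _)
  rw [h1, ← pvBox_enc grid.length (((PySem.List.pyGet? grid 0).getD "").toList.length),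
    List.foldl_map]

-- ===== relating port B to the flat model =====

lemma pvBstep_eq (grid : List String) (ly lx : Nat) (s : Nat) (hs : s < ly * lx * 4) :
    pvB_step grid ly lx (s : Int) = ((pvFn grid ly lx s : Nat) : Int) := by
  obtain ⟨hy, hx, hd⟩ := pvDec_bounds ly lx s hs
  have hly : 0 < ly := by omega
  have hlx : 0 < lx := by omega
  have hdec_d : PySem.Int.mod (s : Int) 4 = ((pvDecD s : Nat) : Int) := by
    rw [show (4:Int) = ((4:Nat):Int) from rfl, PySem.Int.mod_natCast]; rfl
  have hdec_x : PySem.Int.mod (PySem.Int.floordiv (s : Int) 4) (lx : Int)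
      = ((pvDecX lx s : Nat) : Int) := by
    rw [show (4:Int) = ((4:Nat):Int) from rfl, PySem.Int.floordiv_natCast,
      PySem.Int.mod_natCast]; rfl
  have hdec_y : PySem.Int.floordiv (s : Int) (4 * (lx : Int)) = ((pvDecY lx s : Nat) : Int) := by
    rw [show (4 : Int) * (lx : Int) = ((4 * lx : Nat) : Int) from by push_cast; ring,
      PySem.Int.floordiv_natCast]; rfl
  unfold pvB_step
  rw [hdec_d, hdec_x, hdec_y]
  simp only [PySem.List.pyGetD_natCast, PySem.Str.pyGet?_natCast]
  rw [pvDir_cast_B ((grid.getD (pvDecY lx s) "").toList[(pvDecX lx s)]?) (pvDecD s) hd,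
    pvMove_y (pvDecY lx s) ly _ hly (pvDirN_lt _ _ hd),
    pvMove_x (pvDecX lx s) lx _ hlx (pvDirN_lt _ _ hd)]
  unfold pvFn
  rw [if_pos hs]
  unfold pvEnc pvStepN
  push_cast
  ring

lemma pvLoop_eq (grid : List String) (ly lx : Nat) :
    ∀ (fuel : Nat) (s t : Nat) (k : Int), t < ly * lx * 4 →
      pvB_loop grid ly lx fuel (s : Int) (t : Int) k
        = ((((pvMLoop (pvFn grid ly lx) fuel s t k).1 : Nat) : Int),
           (pvMLoop (pvFn grid ly lx) fuel s t k).2) := by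
  intro fuel
  induction fuel with
  | zero => intro s t k ht; rfl
  | succ fuel ih =>
    intro s t k ht
    simp only [pvB_loop, pvMLoop]
    by_cases hc : s < t
    · rw [if_pos (by exact_mod_cast hc), if_pos hc, pvBstep_eq grid ly lx t ht]
      exact ih s _ (k + 1) (pvFn_lt grid ly lx t ht)
    · rw [if_neg (by exact_mod_cast hc), if_neg hc]

lemma pvB_to_model (grid : List String) :
    solution_alt grid = PySem.List.sorted
      ((List.range (grid.length * (((PySem.List.pyGet? grid 0).getD "").toList.length) * 4)).foldl
        (pvBBody (pvFn grid grid.length (((PySem.List.pyGet? grid 0).getD "").toList.length))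
          (grid.length * (((PySem.List.pyGet? grid 0).getD "").toList.length) * 4))
        [])
      (fun z => z) false := by
  set ly := grid.length
  set lx := ((PySem.List.pyGet? grid 0).getD "").toList.length
  set n := ly * lx * 4 with hn
  simp only [solution_alt, PySem.List.pyRange_zero, Int.toNat_natCast, List.foldl_map]
  congr 1
  apply PySem.List.foldl_congr_mem
  intro acc s hsmem
  have hs : s < n := by simpa using List.mem_range.mp hsmem
  rw [pvBstep_eq grid ly lx s hs, pvLoop_eq grid ly lx n s _ 1 (pvFn_lt grid ly lx s hs)]
  simp only [pvBBody, Nat.cast_inj]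

-- ===== the two models compute the same list =====

lemma pvIterN (F : Nat → Nat) (n : Nat) (hrange : ∀ s, s < n → F s < n) :
    ∀ (k s : Nat), s < n → F^[k] s < n := by
  intro k
  induction k with
  | zero => intro s hs; simpa using hs
  | succ k ih =>
    intro s hs
    rw [Function.iterate_succ_apply']
    exact hrange _ (ih s hs)

lemma pvMWalk_spec (F : Nat → Nat) (n : Nat) (hrange : ∀ s, s < n → F s < n)
    (hinj : Function.Injective F) (s : Nat) (hs : s < n)
    (hper : s ∈ Function.periodicPts F)
    (P : Nat → Prop) (hP : ∀ t, pvOrb F s t → ¬ P t) :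
    ∀ (fuel k : Nat) (cnt : Int) (vf : List Bool),
      k ≤ Function.minimalPeriod F s →
      Function.minimalPeriod F s - k ≤ fuel →
      vf.length = n →
      (∀ t, t < n → (vf.getD t false = true ↔ (P t ∨ ∃ j, j < k ∧ F^[j] s = t))) →
      (pvMWalk F fuel (F^[k] s) cnt vf).1 = cnt + ((Function.minimalPeriod F s - k : Nat) : Int)
      ∧ (pvMWalk F fuel (F^[k] s) cnt vf).2.length = n
      ∧ ∀ t, t < n →
          ((pvMWalk F fuel (F^[k] s) cnt vf).2.getD t false = true ↔ (P t ∨ pvOrb F s t)) := by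
  have hp0 : 0 < Function.minimalPeriod F s :=
    Function.minimalPeriod_pos_of_mem_periodicPts hper
  intro fuel
  induction fuel with
  | zero =>
    intro k cnt vf hk hfuel hlen hvf
    have hk' : k = Function.minimalPeriod F s := by omega
    subst hk'
    refine ⟨by simp [pvMWalk], hlen, fun t ht => ?_⟩
    rw [show pvMWalk F 0 (F^[Function.minimalPeriod F s] s) cnt vf = (cnt, vf) from rfl]
    rw [hvf t ht, pvOrb_iff_lt_per F s t hper]
  | succ fuel ih =>
    intro k cnt vf hk hfuel hlen hvf
    by_cases hkp : k = Function.minimalPeriod F s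
    · subst hkp
      have hcond : vf.getD (F^[Function.minimalPeriod F s] s) false = true := by
        rw [Function.iterate_minimalPeriod, hvf s hs]
        exact Or.inr ⟨0, hp0, rfl⟩
      simp only [pvMWalk, hcond, if_true]
      refine ⟨by simp, hlen, fun t ht => ?_⟩
      rw [hvf t ht, pvOrb_iff_lt_per F s t hper]
    · have hklt : k < Function.minimalPeriod F s := lt_of_le_of_ne hk hkp
      have htk : F^[k] s < n := pvIterN F n hrange k s hs
      have hcond : vf.getD (F^[k] s) false = false := by
        rw [Bool.eq_false_iff, Ne, hvf _ htk]
        rintro (hPt | ⟨j, hj, hje⟩)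
        · exact hP _ ⟨k, rfl⟩ hPt
        · have : j = k := Function.iterate_eq_iterate_iff_of_lt_minimalPeriod
            (by omega) hklt |>.mp hje
          omega
      simp only [pvMWalk, hcond, Bool.false_eq_true, if_false]
      have hFsucc : F (F^[k] s) = F^[k + 1] s := (Function.iterate_succ_apply' F k s).symm
      rw [hFsucc]
      obtain ⟨c1, c2, c3⟩ := ih (k + 1) (cnt + 1) (vf.set (F^[k] s) true)
        (by omega) (by omega) (by simp [hlen])
        (by
          intro t ht
          by_cases htt : t = F^[k] s
          · subst htt
            rw [pvGetD_set_self _ _ _ _ (by omega)]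
            exact iff_of_true rfl (Or.inr ⟨k, by omega, rfl⟩)
          · rw [pvGetD_set_ne _ _ _ _ _ htt, hvf t ht]
            constructor
            · rintro (h | ⟨j, hj, hje⟩)
              · exact Or.inl h
              · exact Or.inr ⟨j, by omega, hje⟩
            · rintro (h | ⟨j, hj, hje⟩)
              · exact Or.inl h
              · rcases Nat.lt_or_ge j k with hjk | hjk
                · exact Or.inr ⟨j, hjk, hje⟩
                · have : j = k := by omega
                  subst this
                  exact absurd hje.symm htt)
      refine ⟨?_, c2, c3⟩
      rw [c1]
      push_cast
      omega

lemma pvMLoop_min (F : Nat → Nat) (n : Nat) (hrange : ∀ s, s < n → F s < n)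
    (hinj : Function.Injective F) (s : Nat) (hs : s < n)
    (hper : s ∈ Function.periodicPts F)
    (hmin : ∀ u, pvOrb F s u → s ≤ u) :
    ∀ (fuel k : Nat), 1 ≤ k → k ≤ Function.minimalPeriod F s →
      Function.minimalPeriod F s - k ≤ fuel →
      pvMLoop F fuel s (F^[k] s) (k : Int) = (s, ((Function.minimalPeriod F s : Nat) : Int)) := by
  have hp0 : 0 < Function.minimalPeriod F s :=
    Function.minimalPeriod_pos_of_mem_periodicPts hper
  intro fuel
  induction fuel with
  | zero =>
    intro k hk1 hk hfuel
    have hk' : k = Function.minimalPeriod F s := by omega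
    subst hk'
    rw [Function.iterate_minimalPeriod]
    rfl
  | succ fuel ih =>
    intro k hk1 hk hfuel
    by_cases hkp : k = Function.minimalPeriod F s
    · subst hkp
      rw [Function.iterate_minimalPeriod]
      simp [pvMLoop]
    · have hklt : k < Function.minimalPeriod F s := lt_of_le_of_ne hk hkp
      have hne : F^[k] s ≠ s := by
        intro h
        have : k = 0 := Function.iterate_eq_iterate_iff_of_lt_minimalPeriod hklt hp0 |>.mp
          (by simpa using h)
        omega
      have hge : s ≤ F^[k] s := hmin _ ⟨k, rfl⟩
      have hlt : s < F^[k] s := lt_of_le_of_ne hge (Ne.symm hne)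
      simp only [pvMLoop, hlt, if_true]
      have hFsucc : F (F^[k] s) = F^[k + 1] s := (Function.iterate_succ_apply' F k s).symm
      rw [hFsucc, show ((k : Int) + 1) = ((k + 1 : Nat) : Int) from by push_cast; ring]
      exact ih (k + 1) (by omega) (by omega) (by omega)

lemma pvMLoop_notmin (F : Nat → Nat) (s : Nat)
    (hper : s ∈ Function.periodicPts F)
    (hnm : ∃ u, pvOrb F s u ∧ u < s) :
    ∀ (fuel : Nat), (pvMLoop F fuel s (F^[1] s) 1).1 ≠ s := by
  have hp0 : 0 < Function.minimalPeriod F s :=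
    Function.minimalPeriod_pos_of_mem_periodicPts hper
  obtain ⟨u, ⟨k0, hk0⟩, hus⟩ := hnm
  have hj : F^[k0 % Function.minimalPeriod F s] s = u := by
    rw [Function.iterate_mod_minimalPeriod_eq]; exact hk0
  set j := k0 % Function.minimalPeriod F s with hjdef
  have hjlt : j < Function.minimalPeriod F s := Nat.mod_lt _ hp0
  have hj0 : j ≠ 0 := by
    intro h
    rw [h] at hj
    simp at hj
    omega
  have claim : ∀ (fuel k : Nat), 1 ≤ k → k ≤ j →
      (pvMLoop F fuel s (F^[k] s) (k : Int)).1 ≠ s := by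
    intro fuel
    induction fuel with
    | zero =>
      intro k hk1 hkj
      show F^[k] s ≠ s
      intro h
      have : k = 0 := Function.iterate_eq_iterate_iff_of_lt_minimalPeriod
        (by omega) hp0 |>.mp (by simpa using h)
      omega
    | succ fuel ih =>
      intro k hk1 hkj
      by_cases hc : s < F^[k] s
      · have hkjlt : k < j := by
          rcases Nat.lt_or_ge k j with h | h
          · exact h
          · have : k = j := by omega
            subst this
            rw [hj] at hc
            omega
        simp only [pvMLoop, hc, if_true]
        have hFsucc : F (F^[k] s) = F^[k + 1] s := (Function.iterate_succ_apply' F k s).symm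
        rw [hFsucc, show ((k : Int) + 1) = ((k + 1 : Nat) : Int) from by push_cast; ring]
        exact ih (k + 1) (by omega) (by omega)
      · simp only [pvMLoop, hc, if_false]
        show F^[k] s ≠ s
        intro h
        have : k = 0 := Function.iterate_eq_iterate_iff_of_lt_minimalPeriod
          (by omega) hp0 |>.mp (by simpa using h)
        omega
  exact fun fuel => by simpa using claim fuel 1 le_rfl (by omega)

lemma pvModelMain (F : Nat → Nat) (n : Nat) (hrange : ∀ s, s < n → F s < n)
    (hinj : Function.Injective F)
    (hper : ∀ s, s < n → s ∈ Function.periodicPts F ∧ Function.minimalPeriod F s ≤ n) :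
    ∀ (m b : Nat), b + m = n → ∀ (ans : List Int) (vf : List Bool), vf.length = n →
      (∀ t, t < n → (vf.getD t false = true ↔ ∃ u, pvOrb F t u ∧ u < b)) →
      ((List.range' b m).foldl (pvMBody F n) (ans, vf)).1
        = (List.range' b m).foldl (pvBBody F n) ans := by
  intro m
  induction m with
  | zero => intro b hb ans vf hlen hvf; rfl
  | succ m ih =>
    intro b hb ans vf hlen hvf
    have hbn : b < n := by omega
    obtain ⟨hperb, hperle⟩ := hper b hbn
    have hp0 : 0 < Function.minimalPeriod F b :=
      Function.minimalPeriod_pos_of_mem_periodicPts hperb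
    rw [List.range'_succ, List.foldl_cons, List.foldl_cons]
    by_cases hmin : ∀ u, pvOrb F b u → b ≤ u
    · -- b is the minimum of a fresh cycle: A walks it, B appends its length
      have hcf : vf.getD b false = false := by
        rw [Bool.eq_false_iff, Ne, hvf b hbn]
        rintro ⟨u, hu, hul⟩
        exact absurd (hmin u hu) (by omega)
      have hP : ∀ t, pvOrb F b t → ¬ ∃ u, pvOrb F t u ∧ u < b := by
        rintro t hbt ⟨u, htu, hul⟩
        exact absurd (hmin u (pvOrb_trans F b t u hbt htu)) (by omega)
      obtain ⟨w1, w2, w3⟩ := pvMWalk_spec F n hrange hinj b hbn hperb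
        (fun t => ∃ u, pvOrb F t u ∧ u < b) hP n 0 0 vf (by omega) (by omega) hlen
        (by intro t ht; rw [hvf t ht]; simp)
      rw [Function.iterate_zero_apply] at w1 w2 w3
      have hloop := pvMLoop_min F n hrange hinj b hbn hperb hmin n 1 le_rfl hp0 (by omega)
      rw [Function.iterate_one] at hloop
      simp only [Nat.cast_one] at hloop
      simp only [pvMBody, pvBBody, hcf, Bool.false_eq_true, if_false]
      rw [hloop, if_pos rfl, w1]
      have hmem : ∀ t, t < n →
          ((pvMWalk F n b 0 vf).2.getD t false = true ↔ ∃ u, pvOrb F t u ∧ u < b + 1) := by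
        intro t ht
        rw [w3 t ht]
        constructor
        · rintro (⟨u, hu, hul⟩ | horb)
          · exact ⟨u, hu, by omega⟩
          · exact ⟨b, pvOrb_symm F b t hperb horb, by omega⟩
        · rintro ⟨u, hu, hul⟩
          rcases Nat.lt_or_ge u b with h | h
          · exact Or.inl ⟨u, hu, h⟩
          · have hub : u = b := by omega
            subst hub
            exact Or.inr (pvOrb_symm F t u (hper t ht).1 hu)
      have := ih (b + 1) (by omega) (ans ++ [(0 : Int) + ((Function.minimalPeriod F b - 0 : Nat) : Int)])
        (pvMWalk F n b 0 vf).2 w2 hmem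
      simpa using this
    · -- b lies on an already-counted cycle: both skip it
      push_neg at hmin
      obtain ⟨u, hu, hul⟩ := hmin
      have hct : vf.getD b false = true := by
        rw [hvf b hbn]
        exact ⟨u, hu, by omega⟩
      have hnm := pvMLoop_notmin F b hperb ⟨u, hu, by omega⟩ n
      rw [Function.iterate_one] at hnm
      simp only [pvMBody, pvBBody, hct, if_true]
      rw [if_neg hnm]
      apply ih (b + 1) (by omega) ans vf hlen
      intro t ht
      rw [hvf t ht]
      constructor
      · rintro ⟨v, hv, hvl⟩
        exact ⟨v, hv, by omega⟩
      · rintro ⟨v, hv, hvl⟩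
        rcases Nat.lt_or_ge v b with h | h
        · exact ⟨v, hv, h⟩
        · have : v = b := by omega
          subst this
          exact ⟨u, pvOrb_trans F t v u hv hu, hul⟩

-- ===== VERDICT (by name: the statement is the Claim_ definition above) =====
theorem solution_spec : Claim_equal_solution := by
  intro grid _ _
  unfold Spec_solution
  rw [pvA_to_model, pvB_to_model]
  set ly := grid.length
  set lx := ((PySem.List.pyGet? grid 0).getD "").toList.length
  set n := ly * lx * 4 with hn
  congr 1
  rw [List.range_eq_range']
  exact pvModelMain (pvFn grid ly lx) n (fun s hs => pvFn_lt grid ly lx s hs)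
    (pvFn_inj grid ly lx) (fun s hs => pvPeriodic grid ly lx s hs)
    n 0 (by omega) [] (List.replicate n false) (by simp)
    (by intro t ht; simp)
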